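-- pv_equiv track=rewrite | github.com/astavonin/projctl | projctl/handlers/labels.py | _group_labels
-- ===== SOURCE A (Python) =====
-- from collections import defaultdict
-- from typing import Dict, List, Optional
--
-- def _group_labels(labels: List[str]) -> Dict[str, List[str]]:
--     """Group labels by their prefix (text before '::'}).
--
--     Labels containing '::' are grouped under their prefix.  Labels without
--     '::' are collected under the sentinel key '(ungrouped)'.
--
--     Args:
--         labels: List of label strings to group.
--
--     Returns:
--         Ordered dict mapping group name → sorted list of labels.
--     """
--     groups: Dict[str, List[str]] = defaultdict(list)
--     ungrouped: List[str] = []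
--
--     for label in labels:
--         if "::" in label:
--             prefix = label.split("::")[0]
--             groups[prefix].append(label)
--         else:
--             ungrouped.append(label)
--
--     result: Dict[str, List[str]] = {}
--     for key in sorted(groups):
--         result[key] = sorted(groups[key])
--     if ungrouped:
--         result["(ungrouped)"] = sorted(ungrouped)
--
--     return result
-- ===== SOURCE B (Python) =====
-- def _group_labels(labels):
--     """Sort once globally by (prefix, label), then emit each group as one
--     adjacent run -- no defaultdict and no per-group sort."""
--     grouped = sorted((label.split("::")[0], label) for label in labels if "::" in label)
--     result = {}
--     rest = grouped
--     while rest: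
--         prefix = rest[0][0]
--         k = 1
--         while k < len(rest) and rest[k][0] == prefix:
--             k += 1
--         result[prefix] = [label for _, label in rest[:k]]
--         rest = rest[k:]
--     ungrouped = sorted(label for label in labels if "::" not in label)
--     if ungrouped:
--         result["(ungrouped)"] = ungrouped
--     return result
-- ===== Notes on version B (the rewrite author's own statement) =====
-- stated objective: alternative
-- what changed: Instead of bucketing into a defaultdict and then sorting the key set and every bucket separately, B sorts the (prefix, label) pairs once globally and emits each group as one adjacent run of that single sorted list, so no per-group sort and no key sort are needed.
import Mathlib
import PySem

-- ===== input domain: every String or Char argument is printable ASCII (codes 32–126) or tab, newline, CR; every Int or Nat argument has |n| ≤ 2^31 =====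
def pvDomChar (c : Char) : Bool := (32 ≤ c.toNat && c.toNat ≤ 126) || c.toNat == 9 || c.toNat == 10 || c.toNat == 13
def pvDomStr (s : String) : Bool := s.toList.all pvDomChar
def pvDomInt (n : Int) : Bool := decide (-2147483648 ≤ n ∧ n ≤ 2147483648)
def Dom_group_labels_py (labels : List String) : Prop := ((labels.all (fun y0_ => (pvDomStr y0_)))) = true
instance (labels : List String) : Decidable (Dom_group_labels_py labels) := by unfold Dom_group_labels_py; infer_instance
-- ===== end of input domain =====

-- B groups by sorting the (prefix, label) pairs once and emitting adjacent runs, instead of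
-- A's defaultdict bucketing followed by a key sort and a per-bucket sort (alternative algorithm,
-- same asymptotic cost); equal output proved on all inputs.

-- label.split("::")[0]  (split? with a non-empty separator is `some`, and the split is non-empty, so [0] is its head)
def pvPrefix (label : String) : String :=
  ((PySem.Str.split? label "::").getD []).headD ""

-- ===== PORT A =====
def group_labels_py (labels : List String) : List (String × List String) :=
  let st := labels.foldl
    (fun (st : PySem.Dict String (List String) × List String) label =>
      if PySem.Str.isIn "::" label then
        (st.1.modify (pvPrefix label) [] (fun b => b ++ [label]), st.2)
      else
        (st.1, st.2 ++ [label]))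
    (PySem.Dict.empty, [])
  let groups := st.1
  let ungrouped := st.2
  let result := (PySem.List.sorted groups.keys (fun k => k) false).foldl
    (fun (r : PySem.Dict String (List String)) key =>
      r.insert key (PySem.List.sorted (groups.getD key []) (fun x => x) false))
    PySem.Dict.empty
  let result := if ungrouped ≠ [] then
      result.insert "(ungrouped)" (PySem.List.sorted ungrouped (fun x => x) false)
    else result
  result.items

-- ===== PORT B =====
-- the outer `while rest:` loop of Source B; the inner index-scan `while k < len(rest) and
-- rest[k][0] == prefix` and the slices rest[:k] / rest[k:] are ported exactly as
-- takeWhile/dropWhile of the tail (rest[0] is forced into the run by k starting at 1)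
def pvRuns : List (String × String) → PySem.Dict String (List String) → PySem.Dict String (List String)
  | [], result => result
  | (p, l) :: rest, result =>
      pvRuns (rest.dropWhile (fun q => q.1 == p))
        (result.insert p (l :: (rest.takeWhile (fun q => q.1 == p)).map (·.2)))
  termination_by ps _ => ps.length
  decreasing_by
    simp only [List.length_cons]
    exact Nat.lt_succ_of_le (List.length_dropWhile_le _ _)

def group_labels_py_alt (labels : List String) : List (String × List String) :=
  let grouped := PySem.List.sorted2
    ((labels.filter (fun label => PySem.Str.isIn "::" label)).map
      (fun label => (pvPrefix label, label)))
    (fun p => p.1) (fun p => p.2) false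
  let result := pvRuns grouped PySem.Dict.empty
  let ungrouped := PySem.List.sorted
    (labels.filter (fun label => !(PySem.Str.isIn "::" label))) (fun x => x) false
  let result := if ungrouped ≠ [] then result.insert "(ungrouped)" ungrouped else result
  result.items

-- ===== PRECONDITION & SPEC =====
def Spec_group_labels_py (labels : List String) (out : List (String × List String)) : Prop := out = group_labels_py_alt labels
instance (labels : List String) (out : List (String × List String)) : Decidable (Spec_group_labels_py labels out) := by unfold Spec_group_labels_py; infer_instance

-- ===== CLAIM (what is proved, stated in full; the proofs are below) =====
def Claim_equal_group_labels_py : Prop := ∀ (labels : List String), Dom_group_labels_py labels → Spec_group_labels_py labels (group_labels_py labels)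

-- ===== LEMMAS AND PROOFS =====

def pvHasSep (l : String) : Bool := PySem.Str.isIn "::" l

def pvSpecList : List (String × String) → List (String × List String)
  | [] => []
  | (p, l) :: rest =>
      (p, l :: (rest.takeWhile (fun q => q.1 == p)).map (·.2))
        :: pvSpecList (rest.dropWhile (fun q => q.1 == p))
  termination_by ps => ps.length
  decreasing_by
    simp only [List.length_cons]
    exact Nat.lt_succ_of_le (List.length_dropWhile_le _ _)
def pvRlex (a b : String × String) : Prop := a.1 < b.1 ∨ (a.1 = b.1 ∧ a.2 ≤ b.2)
def pvBlex (a b : String × String) : Bool :=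
  decide (a.1 < b.1) || (!decide (b.1 < a.1) && decide (a.2 < b.2))
theorem pvRlex_trans {a b c : String × String} (h1 : pvRlex a b) (h2 : pvRlex b c) : pvRlex a c := by
  unfold pvRlex at *
  rcases h1 with h1 | ⟨e1, h1⟩ <;> rcases h2 with h2 | ⟨e2, h2⟩
  · exact Or.inl (lt_trans h1 h2)
  · exact Or.inl (e2 ▸ h1)
  · exact Or.inl (e1 ▸ h2)
  · exact Or.inr ⟨e1.trans e2, h1.trans h2⟩
theorem pvBlex_false {a b : String × String} (h : pvBlex a b = false) : pvRlex b a := by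
  unfold pvBlex at h; unfold pvRlex
  simp only [Bool.or_eq_false_iff, Bool.and_eq_false_iff, Bool.not_eq_false', decide_eq_true_eq,
    decide_eq_false_iff_not] at h
  obtain ⟨h1, h2⟩ := h
  by_cases hba : b.1 < a.1
  · exact Or.inl hba
  · rcases h2 with h2 | h2
    · exact Or.inl h2
    · exact Or.inr ⟨le_antisymm (not_lt.mp h1) (not_lt.mp hba), not_lt.mp h2⟩
theorem pvBlex_true {a b : String × String} (h : pvBlex a b = true) : pvRlex a b := by
  unfold pvBlex at h; unfold pvRlex
  simp only [Bool.or_eq_true, Bool.and_eq_true, Bool.not_eq_true', decide_eq_true_eq,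
    decide_eq_false_iff_not] at h
  rcases h with h | ⟨h1, h2⟩
  · exact Or.inl h
  · by_cases hab : a.1 < b.1
    · exact Or.inl hab
    · exact Or.inr ⟨le_antisymm (not_lt.mp h1) (not_lt.mp hab), le_of_lt h2⟩
theorem pv_insertBy_pairwise (x : String × String) (ys : List (String × String))
    (h : ys.Pairwise pvRlex) : (PySem.List.insertBy pvBlex x ys).Pairwise pvRlex := by
  induction ys with
  | nil => simp [PySem.List.insertBy]
  | cons y ys ih =>
    rw [List.pairwise_cons] at h
    obtain ⟨hy, hys⟩ := h
    by_cases hb : pvBlex x y = true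
    · simp only [PySem.List.insertBy, hb, if_pos]
      refine List.Pairwise.cons ?_ (List.Pairwise.cons hy hys)
      intro z hz
      rcases List.mem_cons.mp hz with rfl | hz
      · exact pvBlex_true hb
      · exact pvRlex_trans (pvBlex_true hb) (hy z hz)
    · rw [Bool.not_eq_true] at hb
      simp only [PySem.List.insertBy, hb]
      refine List.Pairwise.cons ?_ (ih hys)
      intro z hz
      rcases (PySem.List.mem_insertBy ..).mp hz with rfl | hz
      · exact pvBlex_false hb
      · exact hy z hz
theorem pv_sorted2_pairwise (xs : List (String × String)) :
    (PySem.List.sorted2 xs (fun p => p.1) (fun p => p.2) false).Pairwise pvRlex := by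
  have key : ∀ (l : List (String × String)) (acc : List (String × String)),
      acc.Pairwise pvRlex →
      (l.foldl (fun acc x => PySem.List.insertBy pvBlex x acc) acc).Pairwise pvRlex := by
    intro l
    induction l with
    | nil => intro acc h; simpa using h
    | cons x l ih =>
      intro acc h
      exact ih _ (pv_insertBy_pairwise x acc h)
  have e : PySem.List.sorted2 xs (fun p => p.1) (fun p => p.2) false
      = xs.foldl (fun acc x => PySem.List.insertBy pvBlex x acc) [] := rfl
  rw [e]
  exact key xs [] List.Pairwise.nil

theorem pvA_fold (labels : List String) (d : PySem.Dict String (List String)) (u : List String) :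
    labels.foldl
      (fun (st : PySem.Dict String (List String) × List String) label =>
        if PySem.Str.isIn "::" label then
          (st.1.modify (pvPrefix label) [] (fun b => b ++ [label]), st.2)
        else
          (st.1, st.2 ++ [label])) (d, u)
    = ((labels.filter pvHasSep).foldl
        (fun d label => d.modify (pvPrefix label) [] (fun b => b ++ [label])) d,
       u ++ labels.filter (fun l => !pvHasSep l)) := by
  induction labels generalizing d u with
  | nil => simp
  | cons x l ih =>
    by_cases hx : PySem.Str.isIn "::" x = true
    · simp only [List.foldl_cons, hx, if_pos, List.filter_cons, pvHasSep, Bool.not_true,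
        Bool.false_eq_true, if_false]
      exact ih (d.modify (pvPrefix x) [] (fun b => b ++ [x])) u
    · rw [Bool.not_eq_true] at hx
      simp only [List.foldl_cons, hx, List.filter_cons, pvHasSep, Bool.not_false,
        Bool.false_eq_true, if_false]
      rw [ih d (u ++ [x])]
      simp [pvHasSep]

theorem pv_getD_groups (l : List String) (d : PySem.Dict String (List String)) (k : String) :
    (l.foldl (fun d label => d.modify (pvPrefix label) [] (fun b => b ++ [label])) d).getD k []
      = d.getD k [] ++ l.filter (fun a => pvPrefix a == k) := by
  induction l generalizing d with
  | nil => simp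
  | cons x l ih =>
    simp only [List.foldl_cons, List.filter_cons]
    rw [ih]
    by_cases hk : pvPrefix x = k
    · rw [PySem.Dict.getD_modify]
      simp [hk]
    · rw [PySem.Dict.getD_modify]
      simp [hk, Ne.symm hk]

theorem pv_keys_groups (l : List String) (d : PySem.Dict String (List String)) :
    (l.foldl (fun d label => d.modify (pvPrefix label) [] (fun b => b ++ [label])) d).keys
      = PySem.Set.update d.keys (l.map pvPrefix) := by
  induction l generalizing d with
  | nil => simp [PySem.Set.update]
  | cons x l ih =>
    simp only [List.foldl_cons, List.map_cons]
    rw [ih]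
    have step : (d.modify (pvPrefix x) [] (fun b => b ++ [x])).keys
        = PySem.Set.add d.keys (pvPrefix x) := by
      have e : d.modify (pvPrefix x) [] (fun b => b ++ [x])
          = d.insert (pvPrefix x) (d.getD (pvPrefix x) [] ++ [x]) := rfl
      rw [e]
      unfold PySem.Set.add
      by_cases hc : d.contains (pvPrefix x) = true
      · have hsc : PySem.Set.contains d.keys (pvPrefix x) = true := by
          rw [PySem.Set.contains_iff]
          exact (PySem.Dict.contains_iff_mem_keys d _).mp hc
        rw [PySem.Dict.keys_insert_of_contains _ _ hc, if_pos hsc]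
      · rw [Bool.not_eq_true] at hc
        have hsc : ¬ PySem.Set.contains d.keys (pvPrefix x) = true := by
          rw [PySem.Set.contains_iff]
          intro hmem
          rw [← PySem.Dict.contains_iff_mem_keys d _] at hmem
          simp [hc] at hmem
        rw [PySem.Dict.keys_insert_of_not_contains _ _ hc, if_neg hsc]
    rw [step]
    rfl

theorem pv_dropWhile_keys_gt (rest : List (String × String)) (p : String)
    (hle : ∀ q ∈ rest, p ≤ q.1) (hp : rest.Pairwise pvRlex) :
    ∀ q ∈ rest.dropWhile (fun q => q.1 == p), p < q.1 := by
  induction rest with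
  | nil => simp
  | cons x t ih =>
    rw [List.pairwise_cons] at hp
    obtain ⟨hx, ht⟩ := hp
    by_cases hxp : x.1 == p
    · rw [List.dropWhile_cons, if_pos hxp]
      exact ih (fun q hq => hle q (List.mem_cons_of_mem _ hq)) ht
    · rw [List.dropWhile_cons, if_neg hxp]
      intro q hq
      have hpx : p < x.1 :=
        lt_of_le_of_ne (hle x (List.mem_cons_self ..)) (fun e => hxp (by simp [e.symm]))
      rcases List.mem_cons.mp hq with rfl | hq
      · exact hpx
      · rcases hx q hq with h | ⟨h, _⟩
        · exact lt_trans hpx h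
        · exact h ▸ hpx

theorem pv_runs_items (ps : List (String × String)) (d : PySem.Dict String (List String))
    (h1 : ps.Pairwise pvRlex) (h2 : ∀ p ∈ ps, d.contains p.1 = false) :
    (pvRuns ps d).items = d.items ++ pvSpecList ps := by
  induction ps using pvSpecList.induct generalizing d with
  | case1 => simp [pvRuns, pvSpecList]
  | case2 p l rest ih =>
    rw [List.pairwise_cons] at h1
    obtain ⟨hhead, hrest⟩ := h1
    have hfresh : d.contains p = false := h2 (p, l) (List.mem_cons_self ..)
    have hgt : ∀ q ∈ rest.dropWhile (fun q => q.1 == p), p < q.1 := by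
      apply pv_dropWhile_keys_gt rest p ?_ hrest
      intro q hq
      rcases hhead q hq with h | ⟨h, _⟩
      · exact le_of_lt h
      · exact le_of_eq h
    have h2' : ∀ q ∈ rest.dropWhile (fun q => q.1 == p),
        (d.insert p (l :: (rest.takeWhile (fun q => q.1 == p)).map (·.2))).contains q.1 = false := by
      intro q hq
      rw [PySem.Dict.contains_insert]
      have hqp : (q.1 == p) = false := by
        simp only [beq_eq_false_iff_ne, ne_eq]
        exact fun e => absurd (hgt q hq) (by simp [e])
      rw [hqp]
      simp only [Bool.false_or]
      exact h2 q (List.mem_cons_of_mem _ ((List.dropWhile_sublist _).mem hq))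
    rw [pvRuns, pvSpecList]
    rw [ih _ (List.Pairwise.sublist (List.dropWhile_sublist _) hrest) h2']
    rw [PySem.Dict.items_insert_of_not_contains _ _ hfresh]
    simp

theorem pv_specList_eq (ps : List (String × String)) (h1 : ps.Pairwise pvRlex) :
    pvSpecList ps
      = (PySem.List.sorted (PySem.Set.ofList (ps.map (·.1))) (fun x => x) false).map
          (fun k => (k, (ps.filter (fun q => q.1 == k)).map (·.2))) := by
  induction ps using pvSpecList.induct with
  | case1 => simp [pvSpecList, PySem.Set.ofList, PySem.List.sorted]
  | case2 p l rest ih =>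
    rw [List.pairwise_cons] at h1
    obtain ⟨hhead, hrest⟩ := h1
    have hdecomp : rest.takeWhile (fun q => q.1 == p) ++ rest.dropWhile (fun q => q.1 == p) = rest :=
      List.takeWhile_append_dropWhile
    have hgt : ∀ q ∈ rest.dropWhile (fun q => q.1 == p), p < q.1 := by
      apply pv_dropWhile_keys_gt rest p ?_ hrest
      intro q hq
      rcases hhead q hq with h | ⟨h, _⟩
      · exact le_of_lt h
      · exact le_of_eq h
    have hrun : ∀ q ∈ rest.takeWhile (fun q => q.1 == p), q.1 = p := by
      intro q hq
      have hb := List.mem_takeWhile_imp hq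
      exact eq_of_beq hb
    set run := rest.takeWhile (fun q => q.1 == p) with hrun_def
    set rest' := rest.dropWhile (fun q => q.1 == p) with hrest'_def
    set S' := PySem.List.sorted (PySem.Set.ofList (rest'.map (·.1))) (fun x => x) false with hS'
    have hmemS' : ∀ k, k ∈ S' → k ∈ rest'.map (·.1) := by
      intro k hk
      rw [hS', PySem.List.mem_sorted] at hk
      exact (PySem.Set.mem_ofList _ _).mp hk
    have hgtS' : ∀ k ∈ S', p < k := by
      intro k hk
      rcases List.mem_map.mp (hmemS' k hk) with ⟨q, hq, rfl⟩
      exact hgt q hq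
    have hsplit : ∀ a, a ∈ rest.map (·.1) ↔ a ∈ run.map (·.1) ++ rest'.map (·.1) := by
      intro a
      rw [← List.map_append, hdecomp]
    -- step 1: the sorted key set of ps is p :: S'
    have hkeys : PySem.List.sorted (PySem.Set.ofList (((p, l) :: rest).map (·.1))) (fun x => x) false
        = p :: S' := by
      apply PySem.List.sorted_eq_of_perm_of_pairwise_lt
      · rw [List.perm_ext_iff_of_nodup]
        · intro a
          rw [PySem.Set.mem_ofList]
          simp only [List.map_cons, List.mem_cons]
          constructor
          · intro ha
            rcases ha with rfl | ha
            · exact Or.inl rfl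
            · exact Or.inr ((hsplit a).mpr (List.mem_append.mpr (Or.inr (hmemS' a ha))))
          · intro ha
            rcases ha with rfl | ha
            · exact Or.inl rfl
            · rcases List.mem_append.mp ((hsplit a).mp ha) with ha | ha
              · rcases List.mem_map.mp ha with ⟨q, hq, rfl⟩
                exact Or.inl (hrun q hq)
              · refine Or.inr ?_
                rw [hS', PySem.List.mem_sorted, PySem.Set.mem_ofList]
                exact ha
        · refine List.nodup_cons.mpr ⟨?_, ?_⟩
          · intro hp
            exact absurd (hgtS' p hp) (lt_irrefl p)
          · exact (PySem.List.sorted_ofList_pairwise_lt _).imp ne_of_lt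
        · exact PySem.Set.nodup_ofList _
      · refine List.pairwise_cons.mpr ⟨hgtS', PySem.List.sorted_ofList_pairwise_lt _⟩
    -- step 2: the bucket of p
    have hbucket : ((p, l) :: rest).filter (fun q => q.1 == p) = (p, l) :: run := by
      rw [List.filter_cons, if_pos (by simp)]
      congr 1
      rw [← hdecomp, List.filter_append]
      have e1 : run.filter (fun q => q.1 == p) = run :=
        List.filter_eq_self.mpr (fun q hq => by simp [hrun q hq])
      have e2 : rest'.filter (fun q => q.1 == p) = [] :=
        List.filter_eq_nil_iff.mpr (fun q hq => by
          simp only [beq_iff_eq]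
          exact fun e => absurd (hgt q hq) (by simp [e]))
      rw [e1, e2, List.append_nil]
    -- step 3: buckets of the other keys
    have hother : ∀ k ∈ S',
        ((p, l) :: rest).filter (fun q => q.1 == k) = rest'.filter (fun q => q.1 == k) := by
      intro k hk
      have hpk : p ≠ k := ne_of_lt (hgtS' k hk)
      rw [List.filter_cons, if_neg (by simp [hpk])]
      rw [← hdecomp, List.filter_append]
      have e1 : run.filter (fun q => q.1 == k) = [] :=
        List.filter_eq_nil_iff.mpr (fun q hq => by simp [hrun q hq, hpk])
      rw [e1, List.nil_append]
    -- assemble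
    rw [pvSpecList, hkeys, List.map_cons]
    congr 1
    · rw [hbucket]
      simp only [List.map_cons]
      rw [hrun_def]
    · rw [ih (List.Pairwise.sublist (List.dropWhile_sublist _) hrest)]
      apply List.map_congr_left
      intro k hk
      rw [hother k hk]


theorem pv_main (labels : List String) : group_labels_py labels = group_labels_py_alt labels := by
  simp only [group_labels_py, group_labels_py_alt]
  rw [pvA_fold labels PySem.Dict.empty []]
  simp only [List.nil_append]
  set G := labels.filter pvHasSep with hG
  set groups := G.foldl (fun d label => d.modify (pvPrefix label) [] (fun b => b ++ [label]))
    PySem.Dict.empty with hgroups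
  -- A's key list is the sorted distinct prefixes
  have hkeys : groups.keys = PySem.Set.ofList (G.map pvPrefix) := by
    rw [hgroups, pv_keys_groups, PySem.Dict.keys_empty, PySem.Set.ofList_eq_foldl]
    rfl
  rw [hkeys]
  set sortedKeys := PySem.List.sorted (PySem.Set.ofList (G.map pvPrefix)) (fun x => x) false
    with hSK
  have hnodupSK : (sortedKeys.map (fun a => a)).Nodup := by
    rw [List.map_id']
    exact (PySem.List.sorted_ofList_pairwise_lt _).imp ne_of_lt
  -- A's result dict, before the ungrouped key
  have hitemsA :
      (sortedKeys.foldl (fun (r : PySem.Dict String (List String)) key =>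
          r.insert key (PySem.List.sorted (groups.getD key []) (fun x => x) false))
        PySem.Dict.empty).items
      = sortedKeys.map (fun k =>
          (k, PySem.List.sorted (G.filter (fun a => pvPrefix a == k)) (fun x => x) false)) := by
    rw [PySem.Dict.items_foldl_insert_fresh sortedKeys (fun a => a)
      (fun a => PySem.List.sorted (groups.getD a []) (fun x => x) false) PySem.Dict.empty
      (fun a _ => PySem.Dict.contains_empty _) hnodupSK]
    have hie : (PySem.Dict.empty : PySem.Dict String (List String)).items = [] := rfl
    rw [hie, List.nil_append]
    apply List.map_congr_left
    intro k _
    rw [hgroups, pv_getD_groups, PySem.Dict.getD_empty, List.nil_append]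
  -- B's sorted pair list
  set ps := PySem.List.sorted2 (G.map (fun label => (pvPrefix label, label)))
    (fun p => p.1) (fun p => p.2) false with hps
  have hpw : ps.Pairwise pvRlex := pv_sorted2_pairwise _
  have hperm : ps.Perm (G.map (fun label => (pvPrefix label, label))) :=
    PySem.List.sorted2_perm _ _ _ _
  have hitemsB : (pvRuns ps PySem.Dict.empty).items = pvSpecList ps := by
    rw [pv_runs_items ps PySem.Dict.empty hpw (fun p _ => PySem.Dict.contains_empty _)]
    have hie : (PySem.Dict.empty : PySem.Dict String (List String)).items = [] := rfl
    rw [hie, List.nil_append]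
  -- bridge: same key list
  have hAB : (ps.map (·.1)).Perm (G.map pvPrefix) := by
    have h := hperm.map (fun q : String × String => q.1)
    simpa [List.map_map, Function.comp] using h
  have hkeybridge : PySem.List.sorted (PySem.Set.ofList (ps.map (·.1))) (fun x => x) false
      = sortedKeys := by
    rw [hSK]
    apply PySem.List.sorted_eq_sorted_of_perm _ _ _ (fun a b h => h)
    rw [List.perm_ext_iff_of_nodup (PySem.Set.nodup_ofList _) (PySem.Set.nodup_ofList _)]
    intro a
    rw [PySem.Set.mem_ofList, PySem.Set.mem_ofList]
    exact ⟨fun h => hAB.mem_iff.mp h, fun h => hAB.mem_iff.mpr h⟩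
  -- bridge: same buckets
  have hbucketbridge : ∀ k, (ps.filter (fun q => q.1 == k)).map (·.2)
      = PySem.List.sorted (G.filter (fun a => pvPrefix a == k)) (fun x => x) false := by
    intro k
    symm
    apply PySem.List.sorted_id_eq_of_perm_of_pairwise
    · have h1 : (ps.filter (fun q => q.1 == k)).Perm
          (((G.map (fun label => (pvPrefix label, label))).filter (fun q => q.1 == k))) :=
        hperm.filter _
      have h2 : (G.map (fun label => (pvPrefix label, label))).filter (fun q => q.1 == k)
          = (G.filter (fun a => pvPrefix a == k)).map (fun label => (pvPrefix label, label)) := by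
        rw [List.filter_map]
        rfl
      have h4 : ((G.filter (fun a => pvPrefix a == k)).map
            (fun label => (pvPrefix label, label))).map (fun q : String × String => q.2)
          = G.filter (fun a => pvPrefix a == k) := by
        simp [List.map_map, Function.comp_def]
      have h3 := (h1.trans (by rw [h2])).map (fun q : String × String => q.2)
      rw [h4] at h3
      exact h3
    · rw [List.pairwise_map]
      refine List.Pairwise.imp_of_mem ?_ (hpw.filter _)
      intro a b ha hb hr
      have hak : a.1 = k := by simpa using (List.mem_filter.mp ha).2
      have hbk : b.1 = k := by simpa using (List.mem_filter.mp hb).2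
      rcases hr with h | ⟨_, h⟩
      · rw [hak, hbk] at h
        exact absurd h (lt_irrefl k)
      · exact h
  -- the two dicts are equal
  have hsame : (sortedKeys.foldl (fun (r : PySem.Dict String (List String)) key =>
          r.insert key (PySem.List.sorted (groups.getD key []) (fun x => x) false))
        PySem.Dict.empty)
      = pvRuns ps PySem.Dict.empty := by
    apply PySem.Dict.ext
    rw [hitemsA, hitemsB, pv_specList_eq ps hpw, hkeybridge]
    apply List.map_congr_left
    intro k _
    rw [hbucketbridge k]
  rw [hsame]
  -- the ungrouped key
  have hU : labels.filter (fun l => !pvHasSep l)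
      = labels.filter (fun label => !(PySem.Str.isIn "::" label)) := rfl
  rw [hU]
  by_cases hne : labels.filter (fun label => !(PySem.Str.isIn "::" label)) = []
  · rw [if_neg (fun h => h hne),
      if_neg (fun h => h ((PySem.List.sorted_eq_nil_iff _ _ _).mpr hne))]
    rfl
  · rw [if_pos hne, if_pos (fun h => hne ((PySem.List.sorted_eq_nil_iff _ _ _).mp h))]
    rfl

-- ===== VERDICT (by name: the statement is the Claim_ definition above) =====
theorem group_labels_py_spec : Claim_equal_group_labels_py := by
  intro labels _
  unfold Spec_group_labels_py
  exact pv_main labels
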